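-- pv_equiv track=rewrite | github.com/openSUSE/unrar_wrapper | unrar_wrapper.py | process_rest
-- ===== SOURCE A (Python) =====
-- def process_rest(rest):
--     """Split the argument to [files], [@list-files] and [path_to_extract/].
--
--     All of these parts are optional.
--
--     Args:
--         rest: a list of strings with the paths to files, @list-files and
--         path_to_extract/
--     Returns:
--         A tuple (files, list_files, path)
--         - files: a list of files, that should be processed
--         - @list-files: a list of text files that contain a list of files that
--           should be processed
--         - path_to_extract/: a string with a directory to write the contents of
--           the archive to
--     Raises:
--     """
--
--     if not rest:
--         return None, None, None
--
--     # UnRAR considers every item ending with '/' as a path.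
--     # If multiple paths are present, only the last one is used.
--     files = []
--     list_files = []
--     path = None
--     for item in rest:
--         if item.endswith('/'):
--             path = item
--         elif item.startswith('@'):
--             list_files.append(item[1:])
--         else:
--             files.append(item)
--
--     return files, list_files, path
-- ===== SOURCE B (Python) =====
-- def _dc(items):
--     """Divide and conquer: split items in half, classify each half recursively,
--     merge with list concatenation; a path from the right half wins."""
--     if len(items) == 1:
--         x = items[0]
--         if x.endswith('/'):
--             return [], [], x
--         if x.startswith('@'):
--             return [], [x[1:]], None
--         return [x], [], None
--     mid = len(items) // 2
--     f1, l1, p1 = _dc(items[:mid])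
--     f2, l2, p2 = _dc(items[mid:])
--     return f1 + f2, l1 + l2, p2 if p2 is not None else p1
--
-- def process_rest(rest):
--     if not rest:
--         return None, None, None
--     return _dc(rest)
-- ===== Notes on version B (the rewrite author's own statement) =====
-- stated objective: alternative
-- what changed: A's single left-to-right classifying loop with mutable accumulators is replaced by a divide-and-conquer recursion: split the list in half, classify each half recursively, merge by concatenation with the right half's path taking precedence.
-- outside the precondition, e.g. on process_rest([]): A returns (None, None, None), B returns (None, None, None)
import Mathlib
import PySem

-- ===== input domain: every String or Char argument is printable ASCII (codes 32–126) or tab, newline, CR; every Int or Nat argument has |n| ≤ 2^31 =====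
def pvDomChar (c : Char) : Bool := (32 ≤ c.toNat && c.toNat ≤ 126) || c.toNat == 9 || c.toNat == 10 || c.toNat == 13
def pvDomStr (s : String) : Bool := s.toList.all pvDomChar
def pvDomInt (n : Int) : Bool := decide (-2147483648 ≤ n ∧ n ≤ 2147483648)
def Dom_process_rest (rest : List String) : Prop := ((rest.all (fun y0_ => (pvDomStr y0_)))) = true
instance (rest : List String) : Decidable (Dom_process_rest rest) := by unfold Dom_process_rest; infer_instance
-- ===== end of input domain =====

-- B replaces A's single classifying loop by a divide-and-conquer recursion (halve, recurse,
-- merge, right half's path wins); objective: alternative. Equivalence is claimed on non-empty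
-- input (on [] the Python returns (None, None, None), not a value of the typed form).

-- ===== PORT A =====
-- A's loop body: in order, '/'-suffix → path, '@'-prefix → list_files (item[1:]), else files.
def processRestStep (s : List String × List String × Option String) (item : String) :
    List String × List String × Option String :=
  if PySem.Str.endswith item "/" then (s.1, s.2.1, some item)
  else if PySem.Str.startswith item "@" then
    (s.1, s.2.1 ++ [PySem.Str.slice item (some 1) none], s.2.2)
  else (s.1 ++ [item], s.2.1, s.2.2)

def process_rest (rest : List String) : List String × List String × Option String :=
  -- Python returns (None, None, None) on empty rest; that input is outside Pre_.
  if rest = [] then ([], [], none)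
  else rest.foldl processRestStep ([], [], none)

-- ===== PORT B =====
-- _dc from Source B: singleton base case, else split at len//2, recurse on both halves,
-- concatenate, 'p2 if p2 is not None else p1' = p2.or p1.
def processRestDC : List String → List String × List String × Option String
  | [] => ([], [], none)  -- unreachable: _dc is only called on non-empty lists
  | [x] =>
    if PySem.Str.endswith x "/" then ([], [], some x)
    else if PySem.Str.startswith x "@" then ([], [PySem.Str.slice x (some 1) none], none)
    else ([x], [], none)
  | x :: y :: t =>
    let l := x :: y :: t
    let mid := l.length / 2
    let r1 := processRestDC (l.take mid)
    let r2 := processRestDC (l.drop mid)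
    (r1.1 ++ r2.1, r1.2.1 ++ r2.2.1, r2.2.2.or r1.2.2)
termination_by l => l.length
decreasing_by
  · simp; omega
  · simp; omega

def process_rest_alt (rest : List String) : List String × List String × Option String :=
  if rest = [] then ([], [], none)
  else processRestDC rest

-- ===== PRECONDITION & SPEC =====
-- Pre_ excludes the empty list, on which A returns (None, None, None) — Nones where lists
-- are expected, not a value of the declared type.
def Pre_process_rest (rest : List String) : Prop := rest ≠ []
instance (rest : List String) : Decidable (Pre_process_rest rest) := by
  unfold Pre_process_rest; infer_instance
def pvWitness_process_rest : List String := ["a", "@lst", "dir/"]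

def Spec_process_rest (rest : List String) (out : List String × List String × Option String) : Prop := out = process_rest_alt rest
instance (rest : List String) (out : List String × List String × Option String) : Decidable (Spec_process_rest rest out) := by unfold Spec_process_rest; infer_instance

-- ===== CLAIM (what is proved, stated in full; the proofs are below) =====
def Claim_equal_process_rest : Prop := ∀ (rest : List String), Dom_process_rest rest → Pre_process_rest rest → Spec_process_rest rest (process_rest rest)

-- ===== LEMMAS AND PROOFS =====

-- The closed form both programs compute: the three classes and the last '/'-item.
def processRestForm (rest : List String) : List String × List String × Option String :=
  (rest.filter (fun x => !PySem.Str.endswith x "/" && !PySem.Str.startswith x "@"),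
   (rest.filter (fun x => PySem.Str.startswith x "@" && !PySem.Str.endswith x "/")).map
     (fun x => PySem.Str.slice x (some 1) none),
   rest.reverse.find? (fun x => PySem.Str.endswith x "/"))

lemma processRestForm_append (l₁ l₂ : List String) :
    processRestForm (l₁ ++ l₂) =
      ((processRestForm l₁).1 ++ (processRestForm l₂).1,
       (processRestForm l₁).2.1 ++ (processRestForm l₂).2.1,
       ((processRestForm l₂).2.2).or (processRestForm l₁).2.2) := by
  simp [processRestForm, List.filter_append, List.find?_append, Option.or]

lemma processRest_foldl_char (rest : List String) :
    ∀ s : List String × List String × Option String,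
    rest.foldl processRestStep s =
      (s.1 ++ (processRestForm rest).1,
       s.2.1 ++ (processRestForm rest).2.1,
       ((processRestForm rest).2.2).or s.2.2) := by
  induction rest with
  | nil => intro s; simp [processRestForm]
  | cons a t ih =>
    intro s
    simp only [List.foldl_cons, ih, processRestForm, List.reverse_cons, List.find?_append,
      List.filter_cons]
    by_cases he : PySem.Chars.endswith a.toList ['/'] = true
    · simp [processRestStep, he]
    · by_cases hs : PySem.Chars.startswith a.toList ['@'] = true
      · simp [processRestStep, he, hs]
      · simp [processRestStep, he, hs]

lemma processRestDC_char : ∀ (rest : List String), rest ≠ [] →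
    processRestDC rest = processRestForm rest := by
  intro rest
  induction rest using processRestDC.induct with
  | case1 => intro h; simp at h
  | case2 x he =>
    intro _
    simp [PySem.Str.endswith] at he
    simp [processRestDC, processRestForm, he]
  | case3 x he hs =>
    intro _
    simp [PySem.Str.endswith, PySem.Str.startswith] at he hs
    simp [processRestDC, processRestForm, he, hs]
  | case4 x he hs =>
    intro _
    simp [PySem.Str.endswith, PySem.Str.startswith] at he hs
    simp [processRestDC, processRestForm, he, hs]
  | case5 x y t l mid ih1 ih2 =>
    intro _
    have h1 : (x :: y :: t).take ((x :: y :: t).length / 2) ≠ [] := by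
      simp [List.take_eq_nil_iff]
    have h2 : (x :: y :: t).drop ((x :: y :: t).length / 2) ≠ [] := by
      simp [List.drop_eq_nil_iff]
      omega
    have hform := processRestForm_append ((x :: y :: t).take ((x :: y :: t).length / 2))
      ((x :: y :: t).drop ((x :: y :: t).length / 2))
    rw [List.take_append_drop] at hform
    have e1 : processRestDC (List.take ((x :: y :: t).length / 2) (x :: y :: t)) =
        processRestForm (List.take ((x :: y :: t).length / 2) (x :: y :: t)) := ih1 h1
    have e2 : processRestDC (List.drop ((x :: y :: t).length / 2) (x :: y :: t)) =
        processRestForm (List.drop ((x :: y :: t).length / 2) (x :: y :: t)) := ih2 h2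
    rw [processRestDC]
    simp only [e1, e2, hform]

-- ===== VERDICT (by name: the statement is the Claim_ definition above) =====
theorem process_rest_spec : Claim_equal_process_rest := by
  intro rest _ hpre
  unfold Spec_process_rest process_rest process_rest_alt
  simp only [if_neg hpre, processRest_foldl_char, processRestDC_char rest hpre]
  simp [processRestForm]
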